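-- pv_equiv track=rewrite | github.com/Jesemeil/PythonProjects | student_grade.py | findHardestSubject
-- ===== SOURCE A (Python) =====
-- def findHardestSubject(scores, numStudents, numSubjects):
--     hardestSubject = -1
--     mostFails = -1
--
--     for sub in range(numSubjects):
--         numFails = countFails(scores, numStudents, numSubjects, sub)
--         if numFails > mostFails:
--             hardestSubject = sub
--             mostFails = numFails
--
--     return hardestSubject
--
-- def countFails(scores, numStudents, numSubjects, subjectIndex):
--     numFails = 0
--     for i in range(numStudents):
--         if scores[i][subjectIndex] < 50:
--             numFails += 1
--     return numFails
-- ===== SOURCE B (Python) =====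
-- def failRow(counts, row):
--     # add this student's fails into the table, column by column (zip truncates
--     # to the table width, so extra columns of a row are ignored)
--     return [c + (1 if v < 50 else 0) for c, v in zip(counts, row)]
--
-- def argmaxFirst(counts):
--     # first index of the maximum (strict '>' keeps the lowest index; [] -> -1)
--     best = -1
--     mostFails = -1
--     for s, c in enumerate(counts):
--         if c > mostFails:
--             best = s
--             mostFails = c
--     return best
--
-- def findHardestSubject(scores, numStudents, numSubjects):
--     counts = [0] * numSubjects
--     for row in scores[:max(numStudents, 0)]:
--         counts = failRow(counts, row)
--     return argmaxFirst(counts)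
-- ===== Notes on version B (the rewrite author's own statement) =====
-- stated objective: alternative
-- what changed: A rescans the matrix column by column (countFails called once per subject, indexing scores[i][sub]); B never indexes: it slices the first numStudents rows, folds each row into a fail-count table with a zip-based row update, and picks the first argmax by enumerating the table.
import Mathlib
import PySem

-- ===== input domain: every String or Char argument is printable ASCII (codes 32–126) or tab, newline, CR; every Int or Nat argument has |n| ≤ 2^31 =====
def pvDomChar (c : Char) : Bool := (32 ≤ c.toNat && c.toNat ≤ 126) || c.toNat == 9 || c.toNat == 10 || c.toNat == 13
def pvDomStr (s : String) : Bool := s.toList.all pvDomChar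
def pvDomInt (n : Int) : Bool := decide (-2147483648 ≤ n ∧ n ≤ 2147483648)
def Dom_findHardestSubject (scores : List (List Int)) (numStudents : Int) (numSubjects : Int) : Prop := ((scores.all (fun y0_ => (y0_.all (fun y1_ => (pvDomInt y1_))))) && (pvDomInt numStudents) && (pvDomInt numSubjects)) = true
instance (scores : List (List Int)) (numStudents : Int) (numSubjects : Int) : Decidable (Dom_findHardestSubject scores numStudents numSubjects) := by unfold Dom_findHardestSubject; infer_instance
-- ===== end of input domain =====

-- B replaces A's per-subject column rescans (scores[i][sub] indexing) by slicing the
-- student rows once, folding each row into a fail-count table via zip, then an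
-- enumerate-based first-argmax pass (alternative decomposition, same cost).


-- ===== PORT A =====
-- scores[i][subjectIndex]; inside Pre_ both indices are in range, so the .getD
-- defaults (Python would raise there) are never reached on admitted inputs
def pvCell (scores : List (List Int)) (i s : Int) : Int :=
  (PySem.List.pyGet? ((PySem.List.pyGet? scores i).getD []) s).getD 0

def countFails (scores : List (List Int)) (numStudents _numSubjects subjectIndex : Int) : Int :=
  (PySem.List.pyRange 0 numStudents 1).foldl
    (fun numFails i => if pvCell scores i subjectIndex < 50 then numFails + 1 else numFails) 0

def findHardestSubject (scores : List (List Int)) (numStudents : Int) (numSubjects : Int) : Int :=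
  ((PySem.List.pyRange 0 numSubjects 1).foldl
    (fun (st : Int × Int) sub =>
      let numFails := countFails scores numStudents numSubjects sub
      if numFails > st.2 then (sub, numFails) else st)
    (-1, -1)).1

-- ===== PORT B =====
-- [c + (1 if v < 50 else 0) for c, v in zip(counts, row)]
def failRow (counts row : List Int) : List Int :=
  (counts.zip row).map (fun p => p.1 + if p.2 < 50 then 1 else 0)

-- first index of the maximum via enumerate (strict '>': lowest index wins; [] -> -1)
def argmaxFirst (counts : List Int) : Int :=
  ((PySem.List.enumerate counts).foldl
    (fun (st : Int × Int) sc => if sc.2 > st.2 then (sc.1, sc.2) else st) (-1, -1)).1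

def findHardestSubject_alt (scores : List (List Int)) (numStudents : Int) (numSubjects : Int) : Int :=
  argmaxFirst
    ((PySem.List.slice scores none (some (max numStudents 0))).foldl failRow
      (List.replicate numSubjects.toNat 0))

-- ===== PRECONDITION & SPEC =====
-- Pre_ excludes exactly the inputs on which A raises IndexError: some accessed cell
-- scores[i][sub] (0 ≤ i < numStudents, 0 ≤ sub < numSubjects) does not exist.
def Pre_findHardestSubject (scores : List (List Int)) (numStudents : Int) (numSubjects : Int) : Prop :=
  numSubjects ≤ 0 ∨ numStudents ≤ 0 ∨
    (numStudents ≤ (scores.length : Int) ∧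
      ∀ row ∈ scores.take numStudents.toNat, numSubjects ≤ (row.length : Int))
instance (scores : List (List Int)) (numStudents : Int) (numSubjects : Int) : Decidable (Pre_findHardestSubject scores numStudents numSubjects) := by unfold Pre_findHardestSubject; infer_instance

def pvWitness_findHardestSubject : List (List Int) × Int × Int := ([[40, 90], [60, 10]], 2, 2)

def Spec_findHardestSubject (scores : List (List Int)) (numStudents : Int) (numSubjects : Int) (out : Int) : Prop := out = findHardestSubject_alt scores numStudents numSubjects
instance (scores : List (List Int)) (numStudents : Int) (numSubjects : Int) (out : Int) : Decidable (Spec_findHardestSubject scores numStudents numSubjects out) := by unfold Spec_findHardestSubject; infer_instance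

-- ===== CLAIM (what is proved, stated in full; the proofs are below) =====
def Claim_equal_findHardestSubject : Prop := ∀ (scores : List (List Int)) (numStudents : Int) (numSubjects : Int), Dom_findHardestSubject scores numStudents numSubjects → Pre_findHardestSubject scores numStudents numSubjects → Spec_findHardestSubject scores numStudents numSubjects (findHardestSubject scores numStudents numSubjects)

-- ===== LEMMAS AND PROOFS =====

-- fails in column s over a list of rows (the common value both sides compute)
def colCount (rows : List (List Int)) (s : Int) (init : Int) : Int :=
  rows.foldl (fun a row => if (PySem.List.pyGet? row s).getD 0 < 50 then a + 1 else a) init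

-- A's index loop over range(k) is the row-wise fold over the first k rows
theorem A_col (scores : List (List Int)) (sub init : Int) :
    ∀ k : Nat, k ≤ scores.length →
      (PySem.List.pyRange 0 (k : Int) 1).foldl
          (fun a i => if pvCell scores i sub < 50 then a + 1 else a) init
        = colCount (scores.take k) sub init := by
  intro k
  induction k with
  | zero =>
    intro _
    simp only [Nat.cast_zero, PySem.List.pyRange_one_eq_nil (le_refl (0:Int))]
    rfl
  | succ k ih =>
    intro hk
    have hk' : k < scores.length := hk
    have hcast : (((k + 1 : Nat)) : Int) = (k : Int) + 1 := by push_cast; ring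
    rw [hcast, PySem.List.pyRange_one_succ_right (by positivity), List.foldl_append,
        ih (le_of_lt hk'), List.take_add_one, List.getElem?_eq_getElem hk']
    simp only [colCount, List.foldl_append, List.foldl_cons, List.foldl_nil,
      Option.toList_some]
    have hc : pvCell scores (k : Int) sub = (PySem.List.pyGet? scores[k] sub).getD 0 := by
      simp [pvCell, PySem.List.pyGet?_of_nonneg _ (Int.natCast_nonneg k),
        List.getElem?_eq_getElem hk']
    rw [hc]

theorem failRow_length (counts row : List Int) (h : counts.length ≤ row.length) :
    (failRow counts row).length = counts.length := by
  simp [failRow]; omega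

theorem foldl_failRow_length (rows : List (List Int)) (counts : List Int)
    (h : ∀ row ∈ rows, counts.length ≤ row.length) :
    (rows.foldl failRow counts).length = counts.length := by
  induction rows generalizing counts with
  | nil => rfl
  | cons r rows ih =>
    rw [List.foldl_cons, ih _ (fun row hm => by
      rw [failRow_length _ _ (h r (by simp))]; exact h row (by simp [hm])),
      failRow_length _ _ (h r (by simp))]

-- entry s of the table after folding the rows is colCount of column s
theorem foldl_failRow_getElem (rows : List (List Int)) (s : Nat) :
    ∀ (counts : List Int), (∀ row ∈ rows, counts.length ≤ row.length) →
      ∀ hs : s < counts.length,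
      (rows.foldl failRow counts)[s]? = some (colCount rows (s : Int) counts[s]) := by
  induction rows with
  | nil => intro counts _ hs; simp [colCount, List.getElem?_eq_getElem hs]
  | cons r rows ih =>
    intro counts h hs
    have hr : counts.length ≤ r.length := h r (by simp)
    have hlen : (failRow counts r).length = counts.length := failRow_length _ _ hr
    have hgs : s < (failRow counts r).length := by rw [hlen]; exact hs
    rw [List.foldl_cons,
        ih (failRow counts r) (fun row hm => by rw [hlen]; exact h row (by simp [hm])) hgs]
    have hget : (failRow counts r)[s]'hgs
        = counts[s] + if (PySem.List.pyGet? r (s : Int)).getD 0 < 50 then 1 else 0 := by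
      have hsr : s < r.length := lt_of_lt_of_le hs hr
      simp [failRow, List.getElem_zip, PySem.List.pyGet?_of_nonneg _ (Int.natCast_nonneg s),
        List.getElem?_eq_getElem hsr]
    rw [hget]
    simp only [colCount, List.foldl_cons]
    split <;> norm_num

-- ===== VERDICT (by name: the statement is the Claim_ definition above) =====
theorem findHardestSubject_spec : Claim_equal_findHardestSubject := by
  intro scores n m _ hpre
  unfold Spec_findHardestSubject findHardestSubject findHardestSubject_alt
  -- B's sliced rows are the first n.toNat rows
  have hslice : PySem.List.slice scores none (some (max n 0)) = scores.take n.toNat := by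
    rw [show max n 0 = ((n.toNat : Nat) : Int) by omega, PySem.List.slice_to_natCast]
  rw [hslice]
  set rows := scores.take n.toNat with hrows
  by_cases hm : m ≤ 0
  · -- numSubjects ≤ 0: A's subject loop is empty, B's table is empty
    have h0 : m.toNat = 0 := by omega
    rw [PySem.List.pyRange_one_eq_nil hm]
    have hempty : rows.foldl failRow (List.replicate m.toNat 0) = [] := by
      rw [h0]
      induction rows with
      | nil => rfl
      | cons r rows ih => simpa [failRow] using ih
    rw [hempty]
    rfl
  · have hm' : 0 < m := by omega
    -- inside Pre_, every accessed row exists and is wide enough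
    have hlen : n.toNat ≤ scores.length ∧ ∀ row ∈ rows, m ≤ (row.length : Int) := by
      rcases hpre with h | h | ⟨h1, h2⟩
      · omega
      · constructor
        · omega
        · intro row hmem
          rw [hrows, show n.toNat = 0 by omega] at hmem
          simp at hmem
      · exact ⟨by omega, h2⟩
    have hwide : ∀ row ∈ rows, (List.replicate m.toNat (0 : Int)).length ≤ row.length := by
      intro row hmem
      have := hlen.2 row hmem
      simp only [List.length_replicate]
      omega
    set counts := rows.foldl failRow (List.replicate m.toNat (0 : Int)) with hcounts
    have hclen : counts.length = m.toNat := by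
      rw [hcounts, foldl_failRow_length _ _ hwide, List.length_replicate]
    -- A's countFails over range(n) is the column count over the sliced rows
    have hcf : ∀ s : Int, countFails scores n m s = colCount rows s 0 := by
      intro s
      have hr : PySem.List.pyRange 0 n 1 = PySem.List.pyRange 0 ((n.toNat : Nat) : Int) 1 := by
        by_cases hn : 0 ≤ n
        · rw [show ((n.toNat : Nat) : Int) = n by omega]
        · rw [PySem.List.pyRange_one_eq_nil (by omega),
              PySem.List.pyRange_one_eq_nil (by omega)]
      rw [countFails, hr, A_col scores s 0 n.toNat hlen.1, hrows]
    -- each table entry is A's countFails for that subject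
    have hentry : ∀ k : Nat, ∀ hk : k < counts.length,
        counts[k] = countFails scores n m (k : Int) := by
      intro k hk
      have h1 := foldl_failRow_getElem rows k (List.replicate m.toNat (0 : Int)) hwide
        (by simpa using (show k < m.toNat by omega))
      rw [← hcounts, List.getElem?_eq_getElem hk, List.getElem_replicate] at h1
      rw [Option.some.injEq] at h1
      rw [h1, hcf]
    -- the enumerate of the table is the range of subjects paired with countFails
    have henum : PySem.List.enumerate counts
        = (PySem.List.pyRange 0 m 1).map (fun i => (i, countFails scores n m i)) := by
      apply List.ext_getElem
      · simp [PySem.List.length_enumerate, PySem.List.length_pyRange_one, hclen]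
      · intro k h1 h2
        have hk : k < counts.length := by
          simpa [PySem.List.length_enumerate] using h1
        rw [PySem.List.getElem_enumerate, List.getElem_map, PySem.List.getElem_pyRange_one,
          hentry k hk]
        simp
    rw [argmaxFirst, henum, List.foldl_map]
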